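-- pv_equiv track=rewrite | github.com/emw314159/badass_tools_from_emily | misc.py | sort_lists_by_rank_of_another_list
-- ===== SOURCE A (Python) =====
-- def sort_lists_by_rank_of_another_list(info_dict, indices_key, reverse=False):
--
--     list_to_get_indices_from = info_dict[indices_key]
--
--     if len(list_to_get_indices_from) != 0:
--
--         indices = [i[0] for i in sorted(enumerate(list_to_get_indices_from), key=lambda x:x[1])]
--
--         if reverse:
--             indices.reverse()
--
--         new_info_dict = {}
--
--         for key in info_dict.keys():
--             new_list = []
--             for i in indices:
--                 new_list.append( info_dict[key][i] )
--             new_info_dict[key] = new_list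
--
--         return new_info_dict
--     else:
--         return info_dict
-- ===== SOURCE B (Python) =====
-- def sort_lists_by_rank_of_another_list(info_dict, indices_key, reverse=False):
--     if len(info_dict[indices_key]) == 0:
--         return info_dict
--     keys = list(info_dict.keys())
--     ref = keys.index(indices_key)
--     rows = [list(r) for r in zip(*(info_dict[k] for k in keys))]
--     rows.sort(key=lambda r: r[ref])
--     if reverse:
--         rows.reverse()
--     return {k: [row[j] for row in rows] for j, k in enumerate(keys)}
-- ===== Notes on version B (the rewrite author's own statement) =====
-- stated objective: idiomatic
-- what changed: Instead of computing an argsort index permutation and then gathering each list element-by-element through repeated dict indexing, B transposes the columns into rows with zip, stably sorts the rows by the reference component (reversing afterwards), and rebuilds the dict from the sorted rows.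
import Mathlib
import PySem

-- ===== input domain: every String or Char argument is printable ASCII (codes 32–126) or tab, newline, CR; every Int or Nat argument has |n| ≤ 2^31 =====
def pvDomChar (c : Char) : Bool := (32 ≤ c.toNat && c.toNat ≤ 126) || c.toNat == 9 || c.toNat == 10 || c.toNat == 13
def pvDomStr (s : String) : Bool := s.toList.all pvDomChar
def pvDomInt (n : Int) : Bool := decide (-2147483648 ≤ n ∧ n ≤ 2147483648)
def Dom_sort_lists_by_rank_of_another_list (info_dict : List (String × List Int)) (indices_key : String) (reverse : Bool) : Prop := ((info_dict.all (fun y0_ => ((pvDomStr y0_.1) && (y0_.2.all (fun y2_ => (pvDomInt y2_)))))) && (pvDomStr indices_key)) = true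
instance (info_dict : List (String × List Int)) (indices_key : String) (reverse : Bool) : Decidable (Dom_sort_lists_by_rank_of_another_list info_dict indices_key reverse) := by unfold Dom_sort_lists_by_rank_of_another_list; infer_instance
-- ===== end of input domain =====

-- B replaces A's argsort-then-gather (index permutation + element-by-element dict indexing) by
-- transposing the columns into rows, stably sorting the rows by the reference component, and
-- rebuilding the dict from the sorted rows (objective: idiomatic; same asymptotic cost).

-- ===== PORT A =====
def sort_lists_by_rank_of_another_list (info_dict : List (String × List Int)) (indices_key : String) (reverse : Bool) : List (String × List Int) :=
  let d := PySem.Dict.mk info_dict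
  match d.get? indices_key with
  | none => []  -- Python raises KeyError here; excluded by Pre_
  | some list_to_get_indices_from =>
    if PySem.List.len list_to_get_indices_from ≠ 0 then
      let indices0 := (PySem.List.sorted (PySem.List.enumerate list_to_get_indices_from 0) (fun x => x.2) false).map (fun i => i.1)
      let indices := if reverse then indices0.reverse else indices0
      -- info_dict[key] inside the loop: key ∈ keys, so getD never hits its default under Pre_
      ((d.keys).foldl (fun nd key =>
        nd.insert key (indices.foldl (fun acc i => acc ++ [PySem.List.pyGetD (d.getD key []) i 0]) [])) PySem.Dict.empty).items
    else info_dict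

-- ===== PORT B =====
-- helper for the hand port of zip(*cols): the length of the shortest column (zip of no columns is empty)
def pvMinLen (ls : List (List Int)) : Nat := match ls.map List.length with | [] => 0 | n :: ns => ns.foldl min n

def sort_lists_by_rank_of_another_list_alt (info_dict : List (String × List Int)) (indices_key : String) (reverse : Bool) : List (String × List Int) :=
  let d := PySem.Dict.mk info_dict
  if PySem.List.len (d.getD indices_key []) = 0 then info_dict
  else
    let keys := d.keys
    let ref : Int := ((PySem.List.index? keys indices_key).getD 0 : Nat)
    let cols := keys.map (fun k => d.getD k [])
    -- zip(*cols): hand port, exact — row j pairs the j-th element of every column, for j below the shortest column length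
    let m : Nat := pvMinLen cols
    let rows := (List.range m).map (fun (j : Nat) => cols.map (fun c => PySem.List.pyGetD c (j : Int) 0))
    let srows := PySem.List.sorted rows (fun r => PySem.List.pyGetD r ref 0) false
    let frows := if reverse then srows.reverse else srows
    ((PySem.List.enumerate keys 0).foldl (fun nd p =>
      nd.insert p.2 (frows.map (fun row => PySem.List.pyGetD row p.1 0))) PySem.Dict.empty).items

-- ===== PRECONDITION & SPEC =====
-- Pre_ excludes exactly the inputs where A raises: a missing indices_key (KeyError) and a column
-- shorter than the reference list when that list is nonempty (IndexError); it also restricts to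
-- association lists with distinct keys, the only ones a Python dict can represent.
def Pre_sort_lists_by_rank_of_another_list (info_dict : List (String × List Int)) (indices_key : String) (reverse : Bool) : Prop :=
  (info_dict.map Prod.fst).Nodup ∧
  (PySem.Dict.mk info_dict).contains indices_key = true ∧
  ∀ p ∈ info_dict, ((PySem.Dict.mk info_dict).getD indices_key []).length ≤ p.2.length
instance (info_dict : List (String × List Int)) (indices_key : String) (reverse : Bool) : Decidable (Pre_sort_lists_by_rank_of_another_list info_dict indices_key reverse) := by unfold Pre_sort_lists_by_rank_of_another_list; infer_instance
def pvWitness_sort_lists_by_rank_of_another_list : (List (String × List Int)) × String × Bool := ([("a", [2, 1]), ("b", [5, 6])], "a", false)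

def Spec_sort_lists_by_rank_of_another_list (info_dict : List (String × List Int)) (indices_key : String) (reverse : Bool) (out : List (String × List Int)) : Prop := out = sort_lists_by_rank_of_another_list_alt info_dict indices_key reverse
instance (info_dict : List (String × List Int)) (indices_key : String) (reverse : Bool) (out : List (String × List Int)) : Decidable (Spec_sort_lists_by_rank_of_another_list info_dict indices_key reverse out) := by unfold Spec_sort_lists_by_rank_of_another_list; infer_instance

-- ===== CLAIM (what is proved, stated in full; the proofs are below) =====
def Claim_equal_sort_lists_by_rank_of_another_list : Prop := ∀ (info_dict : List (String × List Int)) (indices_key : String) (reverse : Bool), Dom_sort_lists_by_rank_of_another_list info_dict indices_key reverse → Pre_sort_lists_by_rank_of_another_list info_dict indices_key reverse → Spec_sort_lists_by_rank_of_another_list info_dict indices_key reverse (sort_lists_by_rank_of_another_list info_dict indices_key reverse)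

-- ===== LEMMAS AND PROOFS =====

-- inserting a mapped element into a mapped list commutes with the map when the comparison factors
theorem pv_insertBy_map {α β : Type} (g : β → α) (bef : α → α → Bool) (x : β) (ys : List β) :
    PySem.List.insertBy bef (g x) (ys.map g) = (PySem.List.insertBy (fun a b => bef (g a) (g b)) x ys).map g := by
  induction ys with
  | nil => simp [PySem.List.insertBy]
  | cons y t ih =>
    simp only [List.map_cons, PySem.List.insertBy]
    by_cases h : bef (g x) (g y) = true <;> simp [h, ih]

-- a stable key-sort of a mapped list is the map of the stable sort under the composed key
theorem pv_sorted_map {α β : Type} (g : β → α) (f : α → Int) (l : List β) :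
    PySem.List.sorted (l.map g) f false = (PySem.List.sorted l (fun x => f (g x)) false).map g := by
  rw [PySem.List.sorted_eq_foldl_insertBy, PySem.List.sorted_eq_foldl_insertBy]
  suffices h : ∀ (acc : List β),
      (l.map g).foldl (fun acc x => PySem.List.insertBy (fun a b => decide (f a < f b)) x acc) (acc.map g)
      = (l.foldl (fun acc x => PySem.List.insertBy (fun a b => decide (f (g a) < f (g b))) x acc) acc).map g by
    simpa using h []
  induction l with
  | nil => intro acc; simp
  | cons x t ih =>
    intro acc
    simp only [List.map_cons, List.foldl_cons]
    rw [pv_insertBy_map g (fun a b => decide (f a < f b)) x acc, ih]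

theorem pv_insertBy_congr {α : Type} (bef bef' : α → α → Bool) (x : α) (ys : List α)
    (h : ∀ y ∈ ys, bef x y = bef' x y) :
    PySem.List.insertBy bef x ys = PySem.List.insertBy bef' x ys := by
  induction ys with
  | nil => rfl
  | cons y t ih =>
    simp only [PySem.List.insertBy]
    rw [h y (by simp)]
    by_cases hb : bef' x y = true <;>
      simp [hb, ih (fun z hz => h z (by simp [hz]))]

-- sorting depends on the key only through its values on the list
theorem pv_sorted_congr {α : Type} (f f' : α → Int) (l : List α)
    (h : ∀ a ∈ l, f a = f' a) :
    PySem.List.sorted l f false = PySem.List.sorted l f' false := by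
  rw [PySem.List.sorted_eq_foldl_insertBy, PySem.List.sorted_eq_foldl_insertBy]
  suffices hs : ∀ (acc : List α), (∀ a ∈ acc, f a = f' a) →
      l.foldl (fun acc x => PySem.List.insertBy (fun a b => decide (f a < f b)) x acc) acc
      = l.foldl (fun acc x => PySem.List.insertBy (fun a b => decide (f' a < f' b)) x acc) acc by
    exact hs [] (by simp)
  induction l with
  | nil => intro acc _; rfl
  | cons x t ih =>
    intro acc hacc
    simp only [List.foldl_cons]
    have hx : f x = f' x := h x (by simp)
    rw [pv_insertBy_congr _ _ x acc (fun y hy => by rw [hx, hacc y hy])]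
    refine ih (fun a ha => h a (by simp [ha])) _ (fun a ha => ?_)
    rcases (PySem.List.mem_insertBy _ _ _ _).1 ha with rfl | ha'
    · exact hx
    · exact hacc a ha'

theorem pv_foldl_min_eq {n : Nat} : ∀ (ns : List Nat) (a : Nat), (∀ x ∈ a :: ns, n ≤ x) → n ∈ a :: ns → ns.foldl min a = n := by
  intro ns
  induction ns with
  | nil => intro a h hm; simp at hm ⊢; omega
  | cons b t ih =>
    intro a h hm
    simp only [List.foldl_cons]
    refine ih (min a b) (fun x hx => ?_) ?_
    · rcases List.mem_cons.1 hx with rfl | hx'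
      · have := h a (by simp); have := h b (by simp); omega
      · exact h x (by simp [hx'])
    · rcases List.mem_cons.1 hm with rfl | hm'
      · have hb := h b (by simp)
        have : min n b = n := by omega
        simp [this]
      · rcases List.mem_cons.1 hm' with rfl | hm''
        · have ha := h a (by simp)
          have : min a n = n := by omega
          simp [this]
        · simp [hm'']


-- ===== VERDICT (by name: the statement is the Claim_ definition above) =====
theorem sort_lists_by_rank_of_another_list_spec : Claim_equal_sort_lists_by_rank_of_another_list := by
  intro info_dict indices_key reverse _ hpre
  obtain ⟨hnd, hcon, hlen⟩ := hpre
  have hsome : ∃ v, (PySem.Dict.mk info_dict).get? indices_key = some v := by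
    rw [PySem.Dict.contains_eq_isSome_get?] at hcon
    exact Option.isSome_iff_exists.1 hcon
  obtain ⟨v, hv⟩ := hsome
  have hgetD : (PySem.Dict.mk info_dict).getD indices_key [] = v := by
    simp [PySem.Dict.getD, hv]
  rw [hgetD] at hlen
  unfold Spec_sort_lists_by_rank_of_another_list
  by_cases hv0 : v = []
  · subst hv0
    unfold sort_lists_by_rank_of_another_list sort_lists_by_rank_of_another_list_alt
    simp [hv, hgetD, PySem.List.len_eq]
  · -- nonempty reference list
    have hlenv : PySem.List.len v ≠ 0 := by
      simp [PySem.List.len_eq, List.length_eq_zero_iff]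
      exact hv0
    have hknd : (PySem.Dict.mk info_dict).keys.Nodup := hnd
    have hkmem : indices_key ∈ (PySem.Dict.mk info_dict).keys :=
      (PySem.Dict.contains_iff_mem_keys _ _).1 hcon
    -- every column is a value of the dict and at least as long as v
    have hcol : ∀ k ∈ (PySem.Dict.mk info_dict).keys,
        (k, (PySem.Dict.mk info_dict).getD k []) ∈ info_dict ∧
        v.length ≤ ((PySem.Dict.mk info_dict).getD k []).length := by
      intro k hk
      have hck : (PySem.Dict.mk info_dict).contains k = true :=
        (PySem.Dict.contains_iff_mem_keys _ _).2 hk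
      rw [PySem.Dict.contains_eq_isSome_get?] at hck
      obtain ⟨w, hw⟩ := Option.isSome_iff_exists.1 hck
      have hmemi : (k, w) ∈ info_dict := PySem.Dict.mem_items_of_get?_eq_some _ hw
      have hgd : (PySem.Dict.mk info_dict).getD k [] = w := by simp [PySem.Dict.getD, hw]
      rw [hgd]
      exact ⟨hmemi, hlen _ hmemi⟩
    -- the reference index in keys
    obtain ⟨r0, hr0⟩ : ∃ r0, PySem.List.index? (PySem.Dict.mk info_dict).keys indices_key = some r0 := by
      rw [← Option.isSome_iff_exists, PySem.List.index?_isSome_iff]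
      exact hkmem
    obtain ⟨hr0lt, hr0get, -⟩ := PySem.List.getElem_of_index?_eq_some hr0
    -- ===== canonical form of port A =====
    have hA : sort_lists_by_rank_of_another_list info_dict indices_key reverse
        = (PySem.Dict.mk info_dict).keys.map (fun k => (k,
            (if reverse then (PySem.List.sorted (PySem.List.enumerate v 0) (fun x => x.2) false).reverse
             else PySem.List.sorted (PySem.List.enumerate v 0) (fun x => x.2) false).map
              (fun p => PySem.List.pyGetD ((PySem.Dict.mk info_dict).getD k []) p.1 0))) := by
      simp only [sort_lists_by_rank_of_another_list, hv]
      rw [if_pos hlenv]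
      have hfold := PySem.Dict.items_foldl_insert_fresh (PySem.Dict.mk info_dict).keys (fun a => a)
        (fun key => (List.foldl (fun acc i => acc ++ [PySem.List.pyGetD ((PySem.Dict.mk info_dict).getD key []) i 0]) []
          (if reverse = true then
              (List.map (fun i => i.1) (PySem.List.sorted (PySem.List.enumerate v 0) (fun x => x.2) false)).reverse
            else List.map (fun i => i.1) (PySem.List.sorted (PySem.List.enumerate v 0) (fun x => x.2) false))))
        PySem.Dict.empty (fun a _ => PySem.Dict.contains_empty _) (by simpa using hknd)
      beta_reduce at hfold
      rw [hfold]
      simp only [PySem.Dict.empty, List.nil_append]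
      refine List.map_congr_left (fun k hk => ?_)
      rw [PySem.List.foldl_append_singleton_eq_map]
      cases reverse <;> simp [List.map_reverse, List.map_map, Function.comp]
    -- the zip length is exactly v.length
    have hble : ∀ x ∈ (((PySem.Dict.mk info_dict).keys.map (fun k => (PySem.Dict.mk info_dict).getD k [])).map List.length),
        v.length ≤ x := by
      intro x hx
      obtain ⟨c, hc, rfl⟩ := List.mem_map.1 hx
      obtain ⟨k, hk, rfl⟩ := List.mem_map.1 hc
      exact (hcol k hk).2
    have hvmem : v.length ∈ (((PySem.Dict.mk info_dict).keys.map (fun k => (PySem.Dict.mk info_dict).getD k [])).map List.length) := by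
      refine List.mem_map.2 ⟨v, ?_, rfl⟩
      refine List.mem_map.2 ⟨indices_key, hkmem, hgetD⟩
    have hm : pvMinLen ((PySem.Dict.mk info_dict).keys.map (fun k => (PySem.Dict.mk info_dict).getD k [])) = v.length := by
      unfold pvMinLen
      obtain ⟨a, ns, hans⟩ := List.exists_cons_of_ne_nil (l := ((PySem.Dict.mk info_dict).keys.map (fun k => (PySem.Dict.mk info_dict).getD k [])).map List.length)
        (by intro h; rw [h] at hvmem; simp at hvmem)
      rw [hans] at hble hvmem ⊢
      exact pv_foldl_min_eq ns a hble hvmem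
    -- the rows of the transpose, indexed by enumerate of the reference list
    have hrows : (List.range v.length).map (fun (j : Nat) => ((PySem.Dict.mk info_dict).keys.map (fun k => (PySem.Dict.mk info_dict).getD k [])).map (fun c => PySem.List.pyGetD c (j : Int) 0))
        = (PySem.List.enumerate v 0).map (fun p => ((PySem.Dict.mk info_dict).keys.map (fun k => (PySem.Dict.mk info_dict).getD k [])).map (fun c => PySem.List.pyGetD c p.1 0)) := by
      apply List.ext_getElem
      · simp [PySem.List.length_enumerate]
      · intro j h1 h2
        simp [PySem.List.getElem_enumerate]
    -- sorting the rows by the reference component = mapping the sorted enumeration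
    have hsortrows : PySem.List.sorted
          ((PySem.List.enumerate v 0).map (fun p => ((PySem.Dict.mk info_dict).keys.map (fun k => (PySem.Dict.mk info_dict).getD k [])).map (fun c => PySem.List.pyGetD c p.1 0)))
          (fun r => PySem.List.pyGetD r ((r0 : Nat) : Int) 0) false
        = (PySem.List.sorted (PySem.List.enumerate v 0) (fun x => x.2) false).map
            (fun q => ((PySem.Dict.mk info_dict).keys.map (fun k => (PySem.Dict.mk info_dict).getD k [])).map (fun c => PySem.List.pyGetD c q.1 0)) := by
      rw [pv_sorted_map]
      refine congrArg _ (pv_sorted_congr _ _ _ (fun p hp => ?_))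
      obtain ⟨k, hk, rfl⟩ := (PySem.List.mem_enumerate_iff _ _ _).1 hp
      simp only [zero_add, PySem.List.pyGetD_natCast]
      rw [List.getD_eq_getElem _ _ (by simpa using hr0lt)]
      simp only [List.getElem_map]
      rw [hr0get, hgetD]
      exact List.getD_eq_getElem _ _ hk
    -- ===== canonical form of port B =====
    have hB : sort_lists_by_rank_of_another_list_alt info_dict indices_key reverse
        = (PySem.List.enumerate (PySem.Dict.mk info_dict).keys 0).map (fun p => (p.2,
            (if reverse then ((PySem.List.sorted (PySem.List.enumerate v 0) (fun x => x.2) false).map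
                  (fun q => ((PySem.Dict.mk info_dict).keys.map (fun k => (PySem.Dict.mk info_dict).getD k [])).map (fun c => PySem.List.pyGetD c q.1 0))).reverse
             else (PySem.List.sorted (PySem.List.enumerate v 0) (fun x => x.2) false).map
                  (fun q => ((PySem.Dict.mk info_dict).keys.map (fun k => (PySem.Dict.mk info_dict).getD k [])).map (fun c => PySem.List.pyGetD c q.1 0))).map
              (fun row => PySem.List.pyGetD row p.1 0))) := by
      simp only [sort_lists_by_rank_of_another_list_alt, hgetD]
      rw [if_neg (by simp [PySem.List.len_eq, List.length_eq_zero_iff]; exact hv0)]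
      simp only [hr0, Option.getD_some, hm, hrows, hsortrows]
      have hfold := PySem.Dict.items_foldl_insert_fresh (PySem.List.enumerate (PySem.Dict.mk info_dict).keys 0) (fun p => p.2)
        (fun p => (List.map (fun row => PySem.List.pyGetD row p.1 0)
          (if reverse = true then ((PySem.List.sorted (PySem.List.enumerate v 0) (fun x => x.2) false).map
                (fun q => ((PySem.Dict.mk info_dict).keys.map (fun k => (PySem.Dict.mk info_dict).getD k [])).map (fun c => PySem.List.pyGetD c q.1 0))).reverse
            else (PySem.List.sorted (PySem.List.enumerate v 0) (fun x => x.2) false).map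
                (fun q => ((PySem.Dict.mk info_dict).keys.map (fun k => (PySem.Dict.mk info_dict).getD k [])).map (fun c => PySem.List.pyGetD c q.1 0)))))
        PySem.Dict.empty (fun a _ => PySem.Dict.contains_empty _)
        (by rw [PySem.List.map_snd_enumerate]; exact hknd)
      beta_reduce at hfold
      rw [hfold]
      simp only [PySem.Dict.empty, List.nil_append]
    -- ===== the two canonical forms agree =====
    rw [hA, hB]
    apply List.ext_getElem
    · simp [PySem.List.length_enumerate]
    · intro j h1 h2
      have hj : j < (PySem.Dict.mk info_dict).keys.length := by simpa using h1
      simp only [List.getElem_map, PySem.List.getElem_enumerate]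
      refine Prod.ext rfl ?_
      simp only [zero_add]
      cases reverse
      · simp only [Bool.false_eq_true, ite_false, List.map_map]
        refine List.map_congr_left fun q _ => ?_
        simp only [Function.comp_apply]
        rw [PySem.List.pyGetD_natCast, List.getD_eq_getElem _ _ (by simpa using hj)]
        simp [List.getElem_map]
      · simp only [ite_true, List.map_reverse, List.map_map]
        refine congrArg List.reverse ?_
        refine List.map_congr_left fun q _ => ?_
        simp only [Function.comp_apply]
        rw [PySem.List.pyGetD_natCast, List.getD_eq_getElem _ _ (by simpa using hj)]
        simp [List.getElem_map]
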